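-- pv_equiv track=rewrite | github.com/MBS94/SumSquareProblem | MathFunctions.py | SquareSumDiffList
-- ===== SOURCE A (Python) =====
-- import math
--
-- def is_square(integer):
--     root = math.sqrt(integer)
--     if int(root + 0.5) ** 2 == integer:
--         return True
--     else:
--         return False
--
-- def SquareSumDiffList(m, n):
--     adjDict = {}
--     for i in range(m, n + 1):
--         adjDict[i] = []
--     for i in range(m, n + 1):
--         for j in range(m, n + 1):
--             if is_square(i + j) and i != j:
--                 adjDict[i].append(j)
--             if is_square(math.fabs(i - j)) and i != j and math.fabs(i-j) != 1:
--                 adjDict[i].append(j)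
--     return adjDict
-- ===== SOURCE B (Python) =====
-- import math
--
--
-- def _row(i, m, n):
--     # ascending j in [m, n] with i + j a perfect square (and j != i)
--     lo, hi = i + m, i + n
--     k0 = math.isqrt(lo - 1) + 1 if lo > 0 else 0   # smallest k >= 0 with k*k >= lo
--     k1 = math.isqrt(hi) if hi >= 0 else -1         # largest k with k*k <= hi
--     sums = [k * k - i for k in range(k0, k1 + 1) if k * k - i != i]
--     # ascending j in [m, n] with |i - j| a perfect square >= 4 (excludes j == i and |i-j| == 1)
--     rl = math.isqrt(i - m) if i >= m else 0
--     rh = math.isqrt(n - i) if n >= i else 0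
--     lows = [i - r * r for r in range(rl, 1, -1)]
--     highs = [i + r * r for r in range(2, rh + 1)]
--     diffs = lows + highs
--     # merge the two ascending lists; on equal j the sum-condition entry comes first
--     out = []
--     while sums and diffs:
--         if sums[0] <= diffs[0]:
--             out.append(sums.pop(0))
--         else:
--             out.append(diffs.pop(0))
--     out.extend(sums)
--     out.extend(diffs)
--     return out
--
--
-- def SquareSumDiffList(m, n):
--     return {i: _row(i, m, n) for i in range(m, n + 1)}
-- ===== Notes on version B (the rewrite author's own statement) =====
-- stated objective: alternative
-- what changed: Instead of scanning all pairs (i,j) and testing each sum/difference for squareness, B enumerates per key i only the square-valued candidates (j = k^2 - i and j = i +/- r^2 via integer sqrt brackets) and merges the two ascending candidate lists, keeping the sum-condition entry first on ties.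
import Mathlib
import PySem

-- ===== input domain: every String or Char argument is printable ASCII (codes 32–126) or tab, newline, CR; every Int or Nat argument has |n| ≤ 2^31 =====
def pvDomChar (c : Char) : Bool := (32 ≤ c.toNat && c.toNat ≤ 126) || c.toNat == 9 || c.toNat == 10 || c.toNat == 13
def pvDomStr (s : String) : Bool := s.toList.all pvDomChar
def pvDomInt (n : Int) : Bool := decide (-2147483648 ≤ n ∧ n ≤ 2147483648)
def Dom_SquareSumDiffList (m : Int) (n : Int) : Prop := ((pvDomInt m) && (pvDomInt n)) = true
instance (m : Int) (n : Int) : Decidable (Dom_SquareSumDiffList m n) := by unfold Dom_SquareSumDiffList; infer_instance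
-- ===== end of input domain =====

-- B replaces A's all-pairs scan by per-key enumeration of the square-valued candidates
-- (integer-sqrt brackets) merged in ascending order: a genuinely different algorithm.


-- ===== PORT A =====
-- hand port of is_square: for the nonnegative arguments ≤ 2^32 reached under Pre_, CPython's
-- float-sqrt rounding test 'int(sqrt(x)+0.5)**2 == x' is exactly "x is a perfect square".
def isSquarePy (x : Int) : Bool := Nat.sqrt x.toNat * Nat.sqrt x.toNat == x.toNat

def SquareSumDiffList (m : Int) (n : Int) : List (Int × List Int) :=
  let keysL := PySem.List.pyRange m (n + 1) 1
  let d0 : PySem.Dict Int (List Int) := keysL.foldl (fun d i => d.insert i []) PySem.Dict.empty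
  let d := keysL.foldl (fun d i =>
      keysL.foldl (fun d j =>
        let d1 := if isSquarePy (i + j) && i != j then d.modify i [] (· ++ [j]) else d
        if isSquarePy |i - j| && i != j && |i - j| != 1 then d1.modify i [] (· ++ [j]) else d1) d) d0
  d.items

-- ===== PORT B =====
-- math.isqrt (Source B only calls it on nonnegative arguments inside Pre_)
def isqrtI (x : Int) : Int := (Nat.sqrt x.toNat : Int)

-- the front-consuming merge loop of Source B (sums entry first on equal heads)
def mergeSD : List Int → List Int → List Int
  | [], d => d
  | s, [] => s
  | a :: s, b :: d => if a ≤ b then a :: mergeSD s (b :: d) else b :: mergeSD (a :: s) d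

def rowB (i m n : Int) : List Int :=
  let lo := i + m
  let hi := i + n
  let k0 := if 0 < lo then isqrtI (lo - 1) + 1 else 0
  let k1 := if 0 ≤ hi then isqrtI hi else -1
  let sums := ((PySem.List.pyRange k0 (k1 + 1) 1).filter (fun k => k * k - i != i)).map
      (fun k => k * k - i)
  let rl := if i ≥ m then isqrtI (i - m) else 0
  let rh := if n ≥ i then isqrtI (n - i) else 0
  let lows := (PySem.List.pyRange rl 1 (-1)).map (fun r => i - r * r)
  let highs := (PySem.List.pyRange 2 (rh + 1) 1).map (fun r => i + r * r)
  mergeSD sums (lows ++ highs)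

def SquareSumDiffList_alt (m : Int) (n : Int) : List (Int × List Int) :=
  ((PySem.List.pyRange m (n + 1) 1).foldl (fun d i => d.insert i (rowB i m n))
    (PySem.Dict.empty : PySem.Dict Int (List Int))).items

-- ===== PRECONDITION & SPEC =====
-- Pre_ excludes exactly the inputs where A raises: for m < 0 ≤ n - m, A calls math.sqrt on the
-- negative sum m + m and CPython raises ValueError; A returns normally everywhere else.
def Pre_SquareSumDiffList (m : Int) (n : Int) : Prop := 0 ≤ m ∨ n < m
instance (m : Int) (n : Int) : Decidable (Pre_SquareSumDiffList m n) := by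
  unfold Pre_SquareSumDiffList; infer_instance
def pvWitness_SquareSumDiffList : Int × Int := (0, 6)

def Spec_SquareSumDiffList (m : Int) (n : Int) (out : List (Int × List Int)) : Prop :=
  out = SquareSumDiffList_alt m n
instance (m : Int) (n : Int) (out : List (Int × List Int)) :
    Decidable (Spec_SquareSumDiffList m n out) := by unfold Spec_SquareSumDiffList; infer_instance

-- ===== CLAIM (what is proved, stated in full; the proofs are below) =====
def Claim_equal_SquareSumDiffList : Prop := ∀ (m : Int) (n : Int), Dom_SquareSumDiffList m n →
  Pre_SquareSumDiffList m n → Spec_SquareSumDiffList m n (SquareSumDiffList m n)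

-- ===== LEMMAS AND PROOFS =====

-- A's two append conditions and the per-j contribution to row i
def c1A (x j : Int) : Bool := isSquarePy (x + j) && x != j
def c2A (x j : Int) : Bool := isSquarePy |x - j| && x != j && |x - j| != 1
def partA (x j : Int) : List Int := (if c1A x j then [j] else []) ++ (if c2A x j then [j] else [])
def rowAf (m n x : Int) : List Int := (PySem.List.pyRange m (n + 1) 1).flatMap (partA x)

-- A's inner-loop body (definitionally the lambda in the port)
def stepA (x : Int) (d : PySem.Dict Int (List Int)) (j : Int) : PySem.Dict Int (List Int) :=
  let d1 := if isSquarePy (x + j) && x != j then d.modify x [] (· ++ [j]) else d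
  if isSquarePy |x - j| && x != j && |x - j| != 1 then d1.modify x [] (· ++ [j]) else d1

def innerA (m n : Int) (d : PySem.Dict Int (List Int)) (x : Int) : PySem.Dict Int (List Int) :=
  (PySem.List.pyRange m (n + 1) 1).foldl (stepA x) d

def initD (m n : Int) : PySem.Dict Int (List Int) :=
  (PySem.List.pyRange m (n + 1) 1).foldl (fun d i => d.insert i ([] : List Int)) PySem.Dict.empty

lemma getD_stepA (x : Int) (d : PySem.Dict Int (List Int)) (j y : Int) :
    (stepA x d j).getD y [] = if y = x then d.getD x [] ++ partA x j else d.getD y [] := by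
  rcases Bool.eq_false_or_eq_true (isSquarePy (x + j) && x != j) with h1 | h1 <;>
    rcases Bool.eq_false_or_eq_true (isSquarePy |x - j| && x != j && |x - j| != 1) with h2 | h2 <;>
      by_cases hyx : y = x <;>
        simp [stepA, partA, c1A, c2A, h1, h2, hyx, PySem.Dict.getD_modify, List.append_assoc]

lemma keys_stepA (x : Int) (d : PySem.Dict Int (List Int)) (j : Int)
    (hx : d.contains x = true) : (stepA x d j).keys = d.keys := by
  have hmod : ∀ (d' : PySem.Dict Int (List Int)) (f : List Int → List Int),
      d'.contains x = true → (d'.modify x [] f).keys = d'.keys := by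
    intro d' f h
    rw [PySem.Dict.keys_modify, PySem.Dict.keys_insert_of_contains d' _ h]
  simp only [stepA]
  rcases Bool.eq_false_or_eq_true (isSquarePy (x + j) && x != j) with h1 | h1 <;>
    rcases Bool.eq_false_or_eq_true (isSquarePy |x - j| && x != j && |x - j| != 1) with h2 | h2 <;>
      simp only [h1, h2, if_true, if_false, Bool.false_eq_true] <;>
      first
        | rfl
        | rw [hmod _ _ hx]
        | rw [hmod _ _ (by simp [PySem.Dict.contains_modify]), hmod _ _ hx]

lemma getD_innerA (l : List Int) (x : Int) (d : PySem.Dict Int (List Int)) (y : Int) :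
    (l.foldl (stepA x) d).getD y [] =
      if y = x then d.getD y [] ++ l.flatMap (partA x) else d.getD y [] := by
  induction l generalizing d with
  | nil => simp
  | cons j l ih =>
    rw [List.foldl_cons, ih, getD_stepA]
    by_cases hyx : y = x <;> simp [hyx, List.flatMap_cons, List.append_assoc]

lemma keys_foldl_stepA (l : List Int) (x : Int) (d : PySem.Dict Int (List Int))
    (hx : d.contains x = true) : (l.foldl (stepA x) d).keys = d.keys := by
  induction l generalizing d with
  | nil => rfl
  | cons j l ih =>
    rw [List.foldl_cons, ih, keys_stepA _ _ _ hx]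
    rw [PySem.Dict.contains_iff_mem_keys, keys_stepA _ _ _ hx,
      ← PySem.Dict.contains_iff_mem_keys]
    exact hx

lemma keys_outer (m n : Int) (l : List Int) (d : PySem.Dict Int (List Int))
    (h : ∀ x ∈ l, x ∈ d.keys) : (l.foldl (innerA m n) d).keys = d.keys := by
  induction l generalizing d with
  | nil => rfl
  | cons x l ih =>
    have hx : d.contains x = true := by
      rw [PySem.Dict.contains_iff_mem_keys]; exact h x (by simp)
    have hk : (innerA m n d x).keys = d.keys := keys_foldl_stepA _ _ _ hx
    rw [List.foldl_cons, ih, hk]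
    intro z hz
    rw [hk]; exact h z (by simp [hz])

lemma getD_outer (m n : Int) (l : List Int) (d : PySem.Dict Int (List Int))
    (hnd : l.Nodup) (h : ∀ x ∈ l, x ∈ d.keys) (y : Int) :
    (l.foldl (innerA m n) d).getD y [] =
      if y ∈ l then d.getD y [] ++ rowAf m n y else d.getD y [] := by
  induction l generalizing d with
  | nil => simp
  | cons x l ih =>
    have hnd' := hnd
    rw [List.nodup_cons] at hnd'
    have hk : (innerA m n d x).keys = d.keys :=
      keys_foldl_stepA _ _ _ (by rw [PySem.Dict.contains_iff_mem_keys]; exact h x (by simp))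
    have hstep : ∀ z, (innerA m n d x).getD z [] =
        if z = x then d.getD z [] ++ rowAf m n x else d.getD z [] := fun z =>
      getD_innerA _ _ _ _
    rw [List.foldl_cons,
      ih (innerA m n d x) hnd'.2 (fun z hz => by rw [hk]; exact h z (by simp [hz])), hstep y]
    by_cases hyl : y ∈ l
    · have hyx : y ≠ x := fun he => hnd'.1 (he ▸ hyl)
      simp [hyl, hyx]
    · by_cases hyx : y = x
      · subst hyx; simp [hyl]
      · simp [hyl, hyx]

lemma items_initD (m n : Int) :
    (initD m n).items = (PySem.List.pyRange m (n + 1) 1).map (fun i => (i, ([] : List Int))) := by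
  have h := PySem.Dict.items_foldl_insert_fresh (l := PySem.List.pyRange m (n + 1) 1)
    (k := fun a => a) (v := fun _ => ([] : List Int)) (d := PySem.Dict.empty)
    (by intro a _; simp [PySem.Dict.contains_empty])
    (by simpa using PySem.List.nodup_pyRange_one m (n + 1))
  simpa [initD] using h

lemma keys_initD (m n : Int) : (initD m n).keys = PySem.List.pyRange m (n + 1) 1 := by
  simp [PySem.Dict.keys, items_initD, Function.comp_def]

lemma getD_initD (m n y : Int) : (initD m n).getD y [] = [] := by
  by_cases hy : y ∈ PySem.List.pyRange m (n + 1) 1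
  · have hmem : (y, ([] : List Int)) ∈ (initD m n).items := by
      rw [items_initD]; exact List.mem_map.mpr ⟨y, hy, rfl⟩
    have hget := PySem.Dict.get?_of_mem_items _ hmem
      (by rw [keys_initD]; exact PySem.List.nodup_pyRange_one m (n + 1))
    rw [PySem.Dict.getD_eq_get?_getD, hget]; rfl
  · rcases Bool.eq_false_or_eq_true ((initD m n).contains y) with hc | hc
    · have := (PySem.Dict.contains_iff_mem_keys _ _).mp hc
      rw [keys_initD] at this
      exact absurd this hy
    · exact PySem.Dict.getD_of_not_contains _ _ hc

lemma A_items (m n : Int) :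
    SquareSumDiffList m n = (PySem.List.pyRange m (n + 1) 1).map (fun i => (i, rowAf m n i)) := by
  have h0 : SquareSumDiffList m n =
      ((PySem.List.pyRange m (n + 1) 1).foldl (innerA m n) (initD m n)).items := rfl
  have hmemk : ∀ x ∈ PySem.List.pyRange m (n + 1) 1, x ∈ (initD m n).keys := by
    intro x hx; rw [keys_initD]; exact hx
  have hkeys : ((PySem.List.pyRange m (n + 1) 1).foldl (innerA m n) (initD m n)).keys =
      PySem.List.pyRange m (n + 1) 1 := by
    rw [keys_outer m n _ _ hmemk, keys_initD]
  have hnd2 : ((PySem.List.pyRange m (n + 1) 1).foldl (innerA m n) (initD m n)).keys.Nodup := by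
    rw [hkeys]; exact PySem.List.nodup_pyRange_one m (n + 1)
  rw [h0, PySem.Dict.items_eq_map_keys _ hnd2 ([] : List Int), hkeys]
  apply List.map_congr_left
  intro i hi
  rw [getD_outer m n _ _ (PySem.List.nodup_pyRange_one m (n + 1)) hmemk i]
  simp [hi, getD_initD]

lemma B_items (m n : Int) :
    SquareSumDiffList_alt m n =
      (PySem.List.pyRange m (n + 1) 1).map (fun i => (i, rowB i m n)) := by
  have h := PySem.Dict.items_foldl_insert_fresh (l := PySem.List.pyRange m (n + 1) 1)
    (k := fun a => a) (v := fun i => rowB i m n) (d := PySem.Dict.empty)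
    (by intro a _; simp [PySem.Dict.contains_empty])
    (by simpa using PySem.List.nodup_pyRange_one m (n + 1))
  simpa [SquareSumDiffList_alt] using h

-- integer-sqrt facts
lemma isqrtI_nonneg (x : Int) : 0 ≤ isqrtI x := by
  simp [isqrtI]

lemma isqrt_bracket (x : Int) (hx : 0 ≤ x) :
    isqrtI x * isqrtI x ≤ x ∧ x < (isqrtI x + 1) * (isqrtI x + 1) := by
  have h1 := Nat.sqrt_le' x.toNat
  have h2 := Nat.lt_succ_sqrt' x.toNat
  have hx' : ((x.toNat : Int)) = x := Int.toNat_of_nonneg hx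
  unfold isqrtI
  constructor
  · have := (Nat.cast_le (α := Int)).mpr h1
    push_cast at this
    nlinarith [this]
  · have := (Nat.cast_lt (α := Int)).mpr h2
    push_cast at this
    nlinarith [this]

lemma le_isqrtI_iff (x r : Int) (hx : 0 ≤ x) (hr : 0 ≤ r) : r ≤ isqrtI x ↔ r * r ≤ x := by
  obtain ⟨hle, hlt⟩ := isqrt_bracket x hx
  have hnn := isqrtI_nonneg x
  constructor
  · intro h; nlinarith
  · intro h; nlinarith

lemma isSquarePy_of_sq (k : Int) (hk : 0 ≤ k) : isSquarePy (k * k) = true := by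
  have hc : ((k.toNat : Int)) = k := Int.toNat_of_nonneg hk
  have h : (k * k).toNat = k.toNat * k.toNat := by
    have h2 : k * k = ((k.toNat * k.toNat : Nat) : Int) := by push_cast [hc]; ring
    rw [h2, Int.toNat_natCast]
  have hs := Nat.sqrt_eq' k.toNat
  rw [pow_two] at hs
  simp [isSquarePy, h, hs]

lemma exists_sq_of_isSquarePy (x : Int) (hx : 0 ≤ x) (h : isSquarePy x = true) :
    ∃ k : Int, 0 ≤ k ∧ k * k = x := by
  unfold isSquarePy at h
  rw [beq_iff_eq] at h
  refine ⟨(Nat.sqrt x.toNat : Int), by positivity, ?_⟩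
  rw [← Nat.cast_mul, h, Int.toNat_of_nonneg hx]

-- merge lemmas
lemma mergeSD_nil_right (s : List Int) : mergeSD s [] = s := by
  cases s <;> simp [mergeSD]

lemma mergeSD_cons_right_lt (s : List Int) (a : Int) (d : List Int) (h : ∀ x ∈ s, a < x) :
    mergeSD s (a :: d) = a :: mergeSD s d := by
  cases s with
  | nil => simp [mergeSD]
  | cons b s =>
    have hb : a < b := h b (by simp)
    simp [mergeSD, not_le.mpr hb]

lemma mergeSD_cons_left_le (s : List Int) (a : Int) (d : List Int) (h : ∀ x ∈ d, a ≤ x) :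
    mergeSD (a :: s) d = a :: mergeSD s d := by
  cases d with
  | nil => simp [mergeSD_nil_right]
  | cons b d =>
    have hb : a ≤ b := h b (by simp)
    simp [mergeSD, hb]

lemma mergeSD_filter (l : List Int) (p q : Int → Bool) (hl : l.Pairwise (· < ·)) :
    mergeSD (l.filter p) (l.filter q) =
      l.flatMap (fun j => (if p j then [j] else []) ++ (if q j then [j] else [])) := by
  induction l with
  | nil => simp [mergeSD]
  | cons j l ih =>
    rw [List.pairwise_cons] at hl
    have hlt : ∀ x : Int, x ∈ l → j < x := hl.1
    have ihl := ih hl.2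
    have hS : ∀ x ∈ l.filter p, j < x := fun x hx => hlt x (List.mem_of_mem_filter hx)
    have hD : ∀ x ∈ l.filter q, j < x := fun x hx => hlt x (List.mem_of_mem_filter hx)
    rcases Bool.eq_false_or_eq_true (p j) with hp | hp <;>
      rcases Bool.eq_false_or_eq_true (q j) with hq | hq
    all_goals rw [List.flatMap_cons, List.filter_cons, List.filter_cons]
    · -- p true, q true
      simp only [hp, hq, if_true]
      rw [show mergeSD (j :: l.filter p) (j :: l.filter q) =
            j :: mergeSD (l.filter p) (j :: l.filter q) from by simp [mergeSD],
        mergeSD_cons_right_lt _ _ _ hS, ihl]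
      simp
    · -- p true, q false
      simp only [hp, hq, if_true, if_false, Bool.false_eq_true]
      rw [mergeSD_cons_left_le _ _ _ (fun x hx => le_of_lt (hD x hx)), ihl]
      simp
    · -- p false, q true
      simp only [hp, hq, if_true, if_false, Bool.false_eq_true]
      rw [mergeSD_cons_right_lt _ _ _ hS, ihl]
      simp
    · -- p false, q false
      simp [hp, hq, ihl]

lemma eq_of_plt (l₁ l₂ : List Int) (h₁ : l₁.Pairwise (· < ·)) (h₂ : l₂.Pairwise (· < ·))
    (h : ∀ x, x ∈ l₁ ↔ x ∈ l₂) : l₁ = l₂ := by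
  have n₁ : l₁.Nodup := h₁.imp (fun hab => ne_of_lt hab)
  have n₂ : l₂.Nodup := h₂.imp (fun hab => ne_of_lt hab)
  have hp : l₁.Perm l₂ := (List.perm_ext_iff_of_nodup n₁ n₂).mpr h
  exact hp.eq_of_pairwise (fun a b _ _ hab hba => absurd hab (lt_asymm hba)) h₁ h₂

lemma mem_pyRange_neg_one (a b x : Int) : x ∈ PySem.List.pyRange a b (-1) ↔ b < x ∧ x ≤ a := by
  rw [PySem.List.pyRange_neg_one]
  simp only [List.mem_map, List.mem_range]
  constructor
  · rintro ⟨k, hk, rfl⟩; omega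
  · rintro ⟨hb, ha⟩; exact ⟨(a - x).toNat, by omega, by omega⟩

lemma sums_eq (m n i : Int) (hm : 0 ≤ m) (h1 : m ≤ i) (h2 : i ≤ n) :
    ((PySem.List.pyRange (if 0 < i + m then isqrtI (i + m - 1) + 1 else 0)
        ((if 0 ≤ i + n then isqrtI (i + n) else -1) + 1) 1).filter
          (fun k => k * k - i != i)).map (fun k => k * k - i) =
      (PySem.List.pyRange m (n + 1) 1).filter (c1A i) := by
  set k0 := if 0 < i + m then isqrtI (i + m - 1) + 1 else 0 with hk0def
  set k1 := if 0 ≤ i + n then isqrtI (i + n) else -1 with hk1def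
  have hhi : 0 ≤ i + n := by omega
  have hk1 : k1 = isqrtI (i + n) := by rw [hk1def, if_pos hhi]
  have hk0nn : 0 ≤ k0 := by
    rw [hk0def]; split
    · have := isqrtI_nonneg (i + m - 1); omega
    · omega
  have hbrack0 : ∀ k : Int, 0 ≤ k → (k0 ≤ k ↔ i + m ≤ k * k) := by
    intro k hk
    rw [hk0def]; split
    · next h0 =>
      obtain ⟨hle, hlt⟩ := isqrt_bracket (i + m - 1) (by omega)
      have hnn := isqrtI_nonneg (i + m - 1)
      constructor <;> intro hh <;> nlinarith
    · next h0 =>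
      constructor <;> intro hh
      · nlinarith [mul_nonneg hk hk]
      · exact hk
  have hbrack1 : ∀ k : Int, 0 ≤ k → (k ≤ k1 ↔ k * k ≤ i + n) := by
    intro k hk; rw [hk1]; exact le_isqrtI_iff _ k hhi hk
  apply eq_of_plt
  · rw [List.pairwise_map]
    refine List.Pairwise.imp_of_mem ?_
      ((PySem.List.pairwise_lt_pyRange_one k0 (k1 + 1)).filter _)
    intro a b ha hb hab
    have ha' := PySem.List.mem_pyRange_one.mp (List.mem_of_mem_filter ha)
    have hann : 0 ≤ a := by omega
    nlinarith
  · exact (PySem.List.pairwise_lt_pyRange_one m (n + 1)).filter _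
  · intro x
    simp only [List.mem_map, List.mem_filter, PySem.List.mem_pyRange_one]
    constructor
    · rintro ⟨k, ⟨⟨hk0, hk1'⟩, hkp⟩, rfl⟩
      have hknn : 0 ≤ k := by omega
      have hlo := (hbrack0 k hknn).mp hk0
      have hhi' := (hbrack1 k hknn).mp (by omega)
      refine ⟨⟨by omega, by omega⟩, ?_⟩
      have hadd : i + (k * k - i) = k * k := by ring
      rw [bne_iff_ne] at hkp
      simp [c1A, hadd, isSquarePy_of_sq k hknn, bne_iff_ne]
      omega
    · rintro ⟨⟨hxm, hxn⟩, hxc⟩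
      simp only [c1A, Bool.and_eq_true, bne_iff_ne] at hxc
      obtain ⟨hsq, hne⟩ := hxc
      obtain ⟨k, hknn, hks⟩ := exists_sq_of_isSquarePy (i + x) (by omega) hsq
      refine ⟨k, ⟨⟨(hbrack0 k hknn).mpr (by omega), ?_⟩, ?_⟩, by omega⟩
      · have := (hbrack1 k hknn).mpr (by omega); omega
      · rw [bne_iff_ne]; omega

lemma diffs_eq (m n i : Int) (_hm : 0 ≤ m) (h1 : m ≤ i) (h2 : i ≤ n) :
    (PySem.List.pyRange (if i ≥ m then isqrtI (i - m) else 0) 1 (-1)).map (fun r => i - r * r) ++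
      (PySem.List.pyRange 2 ((if n ≥ i then isqrtI (n - i) else 0) + 1) 1).map
        (fun r => i + r * r) =
      (PySem.List.pyRange m (n + 1) 1).filter (c2A i) := by
  have hrl : (if i ≥ m then isqrtI (i - m) else 0) = isqrtI (i - m) := if_pos (by omega)
  have hrh : (if n ≥ i then isqrtI (n - i) else 0) = isqrtI (n - i) := if_pos (by omega)
  rw [hrl, hrh]
  have hbl : ∀ r : Int, 0 ≤ r → (r ≤ isqrtI (i - m) ↔ r * r ≤ i - m) :=
    fun r hr => le_isqrtI_iff _ r (by omega) hr
  have hbh : ∀ r : Int, 0 ≤ r → (r ≤ isqrtI (n - i) ↔ r * r ≤ n - i) :=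
    fun r hr => le_isqrtI_iff _ r (by omega) hr
  apply eq_of_plt
  · rw [List.pairwise_append]
    refine ⟨?_, ?_, ?_⟩
    · rw [PySem.List.pyRange_neg_one, List.map_map, List.pairwise_map]
      refine List.Pairwise.imp_of_mem ?_ List.pairwise_lt_range
      intro a b ha hb hab
      rw [List.mem_range] at ha hb
      simp only [Function.comp]
      have hb' : (b : Int) < isqrtI (i - m) - 1 := by omega
      have ha' : (a : Int) < isqrtI (i - m) - 1 := by omega
      have : (a : Int) < b := by exact_mod_cast hab
      nlinarith
    · rw [List.pairwise_map]
      refine List.Pairwise.imp_of_mem ?_ (PySem.List.pairwise_lt_pyRange_one 2 _)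
      intro a b ha hb hab
      have ha' := PySem.List.mem_pyRange_one.mp ha
      nlinarith
    · intro x hx y hy
      obtain ⟨r, hr, rfl⟩ := List.mem_map.mp hx
      obtain ⟨sq, hs, rfl⟩ := List.mem_map.mp hy
      have hr' := (mem_pyRange_neg_one _ _ _).mp hr
      have hs' := PySem.List.mem_pyRange_one.mp hs
      nlinarith
  · exact (PySem.List.pairwise_lt_pyRange_one m (n + 1)).filter _
  · intro x
    simp only [List.mem_append, List.mem_map, List.mem_filter, PySem.List.mem_pyRange_one,
      mem_pyRange_neg_one]
    constructor
    · rintro (⟨r, ⟨hr1, hr2⟩, rfl⟩ | ⟨r, ⟨hr1, hr2⟩, rfl⟩)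
      · have hrr := (hbl r (by omega)).mp hr2
        have h4 : 4 ≤ r * r := by nlinarith
        refine ⟨⟨by omega, by omega⟩, ?_⟩
        have habs : |i - (i - r * r)| = r * r := by
          rw [show i - (i - r * r) = r * r by ring, abs_of_nonneg (by omega)]
        simp only [c2A, habs, Bool.and_eq_true, bne_iff_ne]
        exact ⟨⟨isSquarePy_of_sq r (by omega), by omega⟩, by omega⟩
      · have hrr := (hbh r (by omega)).mp (by omega)
        have h4 : 4 ≤ r * r := by nlinarith
        refine ⟨⟨by omega, by omega⟩, ?_⟩
        have habs : |i - (i + r * r)| = r * r := by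
          rw [show i - (i + r * r) = -(r * r) by ring, abs_neg, abs_of_nonneg (by omega)]
        simp only [c2A, habs, Bool.and_eq_true, bne_iff_ne]
        exact ⟨⟨isSquarePy_of_sq r (by omega), by omega⟩, by omega⟩
    · rintro ⟨⟨hxm, hxn⟩, hxc⟩
      simp only [c2A, Bool.and_eq_true, bne_iff_ne] at hxc
      obtain ⟨⟨hsq, hne⟩, hone⟩ := hxc
      obtain ⟨r, hrnn, hrs⟩ := exists_sq_of_isSquarePy _ (abs_nonneg (i - x)) hsq
      have hr0 : r ≠ 0 := by
        intro h; rw [h, zero_mul] at hrs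
        exact hne (by have := abs_eq_zero.mp hrs.symm; omega)
      have hr1 : r ≠ 1 := by
        intro h; rw [h, one_mul] at hrs
        exact hone hrs.symm
      have hr2 : 2 ≤ r := by omega
      rcases lt_or_gt_of_ne (fun h => hne h.symm : x ≠ i) with hlt | hgt
      · left
        have habs : |i - x| = i - x := abs_of_nonneg (by omega)
        rw [habs] at hrs
        refine ⟨r, ⟨by omega, (hbl r (by omega)).mpr (by omega)⟩, by omega⟩
      · right
        have habs : |i - x| = x - i := by rw [abs_sub_comm, abs_of_nonneg (by omega)]
        rw [habs] at hrs
        refine ⟨r, ⟨by omega, ?_⟩, by omega⟩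
        have := (hbh r (by omega)).mpr (by omega); omega

lemma rowB_eq (m n i : Int) (hm : 0 ≤ m) (h1 : m ≤ i) (h2 : i ≤ n) :
    rowB i m n = rowAf m n i := by
  have hrfl : rowB i m n = mergeSD
      (((PySem.List.pyRange (if 0 < i + m then isqrtI (i + m - 1) + 1 else 0)
          ((if 0 ≤ i + n then isqrtI (i + n) else -1) + 1) 1).filter
            (fun k => k * k - i != i)).map (fun k => k * k - i))
      ((PySem.List.pyRange (if i ≥ m then isqrtI (i - m) else 0) 1 (-1)).map
          (fun r => i - r * r) ++
        (PySem.List.pyRange 2 ((if n ≥ i then isqrtI (n - i) else 0) + 1) 1).map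
          (fun r => i + r * r)) := rfl
  rw [hrfl, sums_eq m n i hm h1 h2, diffs_eq m n i hm h1 h2,
    mergeSD_filter _ _ _ (PySem.List.pairwise_lt_pyRange_one m (n + 1))]
  rfl

-- ===== VERDICT (by name: the statement is the Claim_ definition above) =====
theorem SquareSumDiffList_spec : Claim_equal_SquareSumDiffList := by
  intro m n hdom hpre
  unfold Spec_SquareSumDiffList
  rw [A_items, B_items]
  apply List.map_congr_left
  intro i hi
  have hb := PySem.List.mem_pyRange_one.mp hi
  have hm : 0 ≤ m := by rcases hpre with h | h <;> omega
  rw [rowB_eq m n i hm (by omega) (by omega)]
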